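-- pv_equiv track=rewrite | github.com/linnobck/password_cracker | cracker_service.py | unrank_password
-- ===== SOURCE A (Python) =====
-- import string
--
-- def d_to_char(d):
--     return string.ascii_lowercase[d]
--
-- def unrank_password(index, max_length):
--     chars = string.ascii_lowercase
--     n = len(chars) # 26
--
--     # determine length
--     length = 1
--     current_count = n
--     while index >= current_count and length < max_length:
--         index -= current_count
--         length += 1
--         current_count *= n
--
--     if length > max_length:
--         return None
--
--     # remaining index to base-n string
--     guess = []
--
--     for _ in range(length):
--         digit = index % n
--         guess.append(d_to_char(digit))
--         index //= n
--
--     return "".join(reversed(guess))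
-- ===== SOURCE B (Python) =====
-- import string
--
-- def unrank_password(index, max_length):
--     if max_length < 1:
--         return None
--     chars = string.ascii_lowercase
--     m = index + 1
--     digits = []
--     for _ in range(max_length):
--         if m <= 0 and digits:
--             break
--         m -= 1
--         digits.append(chars[m % 26])
--         m //= 26
--     return "".join(reversed(digits))
-- ===== Notes on version B (the rewrite author's own statement) =====
-- stated objective: simpler
-- what changed: Replaces A's two-phase scheme (a length-determination loop subtracting 26^k block counts, then a separate positional base-26 digit loop of that length) with a single bijective base-26 loop on index+1 that emits digits and decides termination in one pass.
import Mathlib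
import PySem

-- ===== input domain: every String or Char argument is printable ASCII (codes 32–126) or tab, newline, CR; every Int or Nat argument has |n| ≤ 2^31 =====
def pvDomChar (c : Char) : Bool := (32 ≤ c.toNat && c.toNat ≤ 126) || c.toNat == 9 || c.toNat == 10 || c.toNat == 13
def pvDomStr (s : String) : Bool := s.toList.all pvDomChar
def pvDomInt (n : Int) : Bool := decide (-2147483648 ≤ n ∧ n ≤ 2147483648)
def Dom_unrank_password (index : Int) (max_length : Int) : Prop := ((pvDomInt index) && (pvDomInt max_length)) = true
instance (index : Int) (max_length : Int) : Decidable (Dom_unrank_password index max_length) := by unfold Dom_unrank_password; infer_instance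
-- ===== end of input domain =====

-- B replaces A's two-phase length-search + positional digit loop by one bijective
-- base-26 pass over index+1 (simpler: one loop instead of two); return values only.

-- ===== PORT A =====
-- string.ascii_lowercase
def azChars : String := "abcdefghijklmnopqrstuvwxyz"

-- def d_to_char(d): return string.ascii_lowercase[d]  (d is always in range here, so getD is never reached)
def d_to_char (d : Int) : Char := (PySem.Str.pyGet? azChars d).getD ' '

-- while index >= current_count and length < max_length: ...
def aLoop (index length cc ml : Int) : Int × Int :=
  if cc ≤ index ∧ length < ml then
    aLoop (index - cc) (length + 1) (cc * 26) ml
  else (index, length)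
termination_by (ml - length).toNat
decreasing_by omega

-- for _ in range(length): digit = index % n; guess.append(d_to_char(digit)); index //= n
def aDigits (index : Int) (k : Nat) (guess : List Char) : List Char :=
  match k with
  | 0 => guess
  | k + 1 => aDigits (PySem.Int.floordiv index 26) k (guess ++ [d_to_char (PySem.Int.mod index 26)])

def unrank_password (index : Int) (max_length : Int) : Option String :=
  if (aLoop index 1 26 max_length).2 > max_length then none
  else some (String.ofList ((aDigits (aLoop index 1 26 max_length).1
                          (aLoop index 1 26 max_length).2.toNat []).reverse))

-- ===== PORT B =====
-- for _ in range(max_length): if m <= 0 and digits: break; m -= 1; digits.append(chars[m % 26]); m //= 26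
def bLoop (m : Int) (digits : List Char) : Nat → List Char
  | 0 => digits
  | k + 1 =>
    if m ≤ 0 ∧ digits ≠ [] then digits
    else bLoop (PySem.Int.floordiv (m - 1) 26)
               (digits ++ [d_to_char (PySem.Int.mod (m - 1) 26)]) k

def unrank_password_alt (index : Int) (max_length : Int) : Option String :=
  if max_length < 1 then none
  else some (String.ofList ((bLoop (index + 1) [] max_length.toNat).reverse))

-- ===== PRECONDITION & SPEC =====
def Spec_unrank_password (index : Int) (max_length : Int) (out : Option String) : Prop := out = unrank_password_alt index max_length
instance (index : Int) (max_length : Int) (out : Option String) : Decidable (Spec_unrank_password index max_length out) := by unfold Spec_unrank_password; infer_instance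

-- ===== CLAIM (what is proved, stated in full; the proofs are below) =====
def Claim_equal_unrank_password : Prop := ∀ (index : Int) (max_length : Int), Dom_unrank_password index max_length → Spec_unrank_password index max_length (unrank_password index max_length)

-- ===== LEMMAS AND PROOFS =====

theorem aLoop_eq (i len cc ml : Int) :
    aLoop i len cc ml
      = if cc ≤ i ∧ len < ml then aLoop (i - cc) (len + 1) (cc * 26) ml
        else (i, len) := by
  conv_lhs => rw [aLoop]

theorem fd26 (i : Int) : PySem.Int.floordiv i 26 = i / 26 :=
  PySem.Int.floordiv_eq_ediv_of_pos (by norm_num)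

theorem fm26 (i : Int) : PySem.Int.mod i 26 = i % 26 :=
  PySem.Int.mod_eq_emod_of_pos (by norm_num)

-- the common digit list both programs produce after the leading digit
def canon (i : Int) : Nat → List Char
  | 0 => []
  | k + 1 => if i < 0 then [] else d_to_char (i % 26) :: canon (i / 26 - 1) k

theorem aLoop_bounds : ∀ (n : Nat) (i cc len ml : Int), (ml - len).toNat ≤ n →
    len ≤ (aLoop i len cc ml).2 ∧ (len ≤ ml → (aLoop i len cc ml).2 ≤ ml) := by
  intro n
  induction n with
  | zero =>
    intro i cc len ml hn
    rw [aLoop_eq, if_neg (by omega)]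
    omega
  | succ n ih =>
    intro i cc len ml hn
    rw [aLoop_eq]
    by_cases hc : cc ≤ i ∧ len < ml
    · rw [if_pos hc]
      have := ih (i - cc) (cc * 26) (len + 1) ml (by omega)
      exact ⟨by omega, fun _ => this.2 (by omega)⟩
    · rw [if_neg hc]
      omega

theorem aLoop_ge (i len cc ml : Int) : len ≤ (aLoop i len cc ml).2 :=
  (aLoop_bounds (ml - len).toNat i cc len ml le_rfl).1

theorem aLoop_le (i len cc ml : Int) (h : len ≤ ml) : (aLoop i len cc ml).2 ≤ ml :=
  (aLoop_bounds (ml - len).toNat i cc len ml le_rfl).2 h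

theorem aLoop_shift : ∀ (n : Nat) (i cc len ml : Int), (ml - len).toNat ≤ n →
    aLoop i len (cc * 26) ml
      = ((aLoop (i / 26) (len - 1) cc (ml - 1)).1 * 26 + i % 26,
         (aLoop (i / 26) (len - 1) cc (ml - 1)).2 + 1) := by
  intro n
  induction n with
  | zero =>
    intro i cc len ml hn
    rw [aLoop_eq i len (cc * 26) ml, aLoop_eq (i / 26) (len - 1) cc (ml - 1)]
    rw [if_neg (by omega), if_neg (by omega)]
    simp only [Prod.mk.injEq]
    omega
  | succ n ih =>
    intro i cc len ml hn
    rw [aLoop_eq i len (cc * 26) ml, aLoop_eq (i / 26) (len - 1) cc (ml - 1)]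
    by_cases hc : cc * 26 ≤ i ∧ len < ml
    · rw [if_pos hc, if_pos (by constructor <;> omega : cc ≤ i / 26 ∧ len - 1 < ml - 1)]
      have h1 : (i - cc * 26) / 26 = i / 26 - cc := by omega
      have h2 : (i - cc * 26) % 26 = i % 26 := by omega
      have hih := ih (i - cc * 26) (cc * 26) (len + 1) ml (by omega)
      rw [hih, h1, h2]
      norm_num
    · rw [if_neg hc, if_neg (by omega : ¬(cc ≤ i / 26 ∧ len - 1 < ml - 1))]
      simp only [Prod.mk.injEq]
      omega

theorem aDigits_append (k : Nat) : ∀ (i : Int) (acc : List Char),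
    aDigits i k acc = acc ++ aDigits i k [] := by
  induction k with
  | zero => intro i acc; simp [aDigits]
  | succ k ih =>
    intro i acc
    show aDigits _ k (acc ++ _) = acc ++ aDigits _ k ([] ++ _)
    rw [ih _ (acc ++ _), ih _ ([] ++ _)]
    simp

theorem aList : ∀ (n : Nat) (ml i : Int), ml.toNat = n + 1 →
    aDigits (aLoop i 1 26 ml).1 (aLoop i 1 26 ml).2.toNat []
      = d_to_char (i % 26) :: canon (i / 26 - 1) n := by
  intro n
  induction n with
  | zero =>
    intro ml i h
    have hml : ml = 1 := by omega
    subst hml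
    rw [aLoop_eq, if_neg (by omega)]
    simp [aDigits, canon]
  | succ n ih =>
    intro ml i h
    by_cases hi : 26 ≤ i
    · rw [aLoop_eq i 1 26 ml, if_pos (by omega : (26:Int) ≤ i ∧ 1 < ml)]
      have hsh := aLoop_shift (ml - 2).toNat (i - 26) 26 (1 + 1) ml (by omega)
      rw [hsh]
      have h1 : (i - 26) / 26 = i / 26 - 1 := by omega
      have h2 : (i - 26) % 26 = i % 26 := by omega
      rw [h1, h2]
      set q := aLoop (i / 26 - 1) (1 + 1 - 1) 26 (ml - 1) with hq
      have hq1 : q = aLoop (i / 26 - 1) 1 26 (ml - 1) := by norm_num [hq]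
      have hge : 1 ≤ q.2 := by rw [hq1]; exact aLoop_ge _ _ _ _
      have htn : (q.2 + 1).toNat = q.2.toNat + 1 := by omega
      rw [htn]
      show aDigits _ (q.2.toNat + 1) [] = _
      show aDigits (PySem.Int.floordiv (q.1 * 26 + i % 26) 26) q.2.toNat
            ([] ++ [d_to_char (PySem.Int.mod (q.1 * 26 + i % 26) 26)]) = _
      have h3 : PySem.Int.floordiv (q.1 * 26 + i % 26) 26 = q.1 := by rw [fd26]; omega
      have h4 : PySem.Int.mod (q.1 * 26 + i % 26) 26 = i % 26 := by rw [fm26]; omega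
      rw [h3, h4, aDigits_append]
      have hIH := ih (ml - 1) (i / 26 - 1) (by omega)
      rw [← hq1] at hIH
      rw [hIH]
      have hnn : ¬ (i / 26 - 1 < 0) := by omega
      simp [canon, hnn]
    · rw [aLoop_eq i 1 26 ml, if_neg (by omega)]
      have hneg : i / 26 - 1 < 0 := by omega
      simp [aDigits, canon, hneg]

theorem bLoop_ne : ∀ (k : Nat) (m : Int) (acc : List Char), acc ≠ [] →
    bLoop m acc k = acc ++ canon (m - 1) k := by
  intro k
  induction k with
  | zero => intro m acc h; simp [bLoop, canon]
  | succ k ih =>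
    intro m acc h
    by_cases hm : m ≤ 0
    · rw [bLoop, if_pos ⟨hm, h⟩]
      have : m - 1 < 0 := by omega
      simp [canon, this]
    · rw [bLoop, if_neg (by tauto)]
      rw [ih _ _ (by simp)]
      have : ¬ (m - 1 < 0) := by omega
      simp [canon, this]

theorem bList (n : Nat) (i : Int) :
    bLoop (i + 1) [] (n + 1) = d_to_char (i % 26) :: canon (i / 26 - 1) n := by
  rw [bLoop, if_neg (by simp)]
  rw [bLoop_ne _ _ _ (by simp)]
  have h1 : i + 1 - 1 = i := by omega
  rw [h1, fd26, fm26]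
  simp

theorem unrank_eq (i ml : Int) : unrank_password i ml = unrank_password_alt i ml := by
  by_cases hml : ml < 1
  · have hA : aLoop i 1 26 ml = (i, 1) := by rw [aLoop_eq]; exact if_neg (by omega)
    unfold unrank_password unrank_password_alt
    have h1 : ((i, (1:Int)).2 > ml) := by simp; omega
    rw [hA, if_pos h1, if_pos hml]
  · unfold unrank_password unrank_password_alt
    have hle : (aLoop i 1 26 ml).2 ≤ ml := aLoop_le _ _ _ _ (by omega)
    have hn : ml.toNat = (ml.toNat - 1) + 1 := by omega
    have hb := bList (ml.toNat - 1) i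
    rw [← hn] at hb
    rw [if_neg (by omega), if_neg hml, aList (ml.toNat - 1) ml i hn, hb]

-- ===== VERDICT (by name: the statement is the Claim_ definition above) =====
theorem unrank_password_spec : Claim_equal_unrank_password := by
  intro index max_length _
  exact unrank_eq index max_length
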